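-- pv_equiv track=rewrite | github.com/Zijie-Tian/pipe_train | torchmobius/pipeline.py | multi_fwd_clock_cycles
-- ===== SOURCE A (Python) =====
-- from typing import TYPE_CHECKING, Dict, Iterable, List, Optional, Tuple, Type, Union, cast
--
-- def multi_fwd_clock_cycles(m: int, n: int, step: int=1) -> Iterable[List[Tuple[int, int]]]:
--     """Generates schedules for each clock cycle."""
--     # m: number of micro-batches
--     # n: number of partitions
--     # i: index of micro-batch
--     # j: index of partition
--     # k: clock number
--     #
--     # k (i,j) (i,j) (i,j)
--     # - ----- ----- -----
--     # 0 (0,0)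
--     # 1 (1,0) (0,1)
--     # 2 (2,0) (1,1) (0,2)
--     # 3       (2,1) (1,2)
--     # 4             (2,2)
--
--     import math
--     n_m = m
--     m = math.ceil(m / step)
--
--
--
--     for k in range(m+n-1):
--         rc = []
--         for j in range(max(1+k-m, 0), min(1+k, n)):
--             temp = []
--             for i in range(step):
--                 if (k-j) * step + i < n_m:
--                     temp.append((k-j) * step + i)
--             rc.append((temp, j))
--         yield rc
-- ===== SOURCE B (Python) =====
-- def multi_fwd_clock_cycles(m: int, n: int, step: int = 1):
--     """Generates schedules for each clock cycle (bucket-based: fill per-cycle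
--     buckets by (partition, chunk) pair instead of scanning the anti-diagonal)."""
--     n_m = m
--     chunks = -((-m) // step)       # ceil(m / step), exactly in integers
--     buckets = [[] for _ in range(chunks + n - 1)]
--     for j in range(n):             # j outermost keeps each cycle j-ascending
--         for c in range(chunks):
--             temp = [c * step + i for i in range(step) if c * step + i < n_m]
--             buckets[c + j].append((temp, j))
--     yield from buckets
-- ===== Notes on version B (the rewrite author's own statement) =====
-- stated objective: alternative
-- what changed: Instead of scanning, for every clock cycle k, the anti-diagonal window of partitions j in [max(1+k-chunks,0), min(1+k,n)), B pre-allocates one empty bucket per cycle and fills them by a plain double loop over (partition j, chunk c), appending each (chunk-range, j) entry to bucket c+j; iterating j outermost keeps every bucket in ascending partition order, and the ceiling is computed with exact integer arithmetic -((-m)//step) instead of math.ceil(m/step).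
import Mathlib
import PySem

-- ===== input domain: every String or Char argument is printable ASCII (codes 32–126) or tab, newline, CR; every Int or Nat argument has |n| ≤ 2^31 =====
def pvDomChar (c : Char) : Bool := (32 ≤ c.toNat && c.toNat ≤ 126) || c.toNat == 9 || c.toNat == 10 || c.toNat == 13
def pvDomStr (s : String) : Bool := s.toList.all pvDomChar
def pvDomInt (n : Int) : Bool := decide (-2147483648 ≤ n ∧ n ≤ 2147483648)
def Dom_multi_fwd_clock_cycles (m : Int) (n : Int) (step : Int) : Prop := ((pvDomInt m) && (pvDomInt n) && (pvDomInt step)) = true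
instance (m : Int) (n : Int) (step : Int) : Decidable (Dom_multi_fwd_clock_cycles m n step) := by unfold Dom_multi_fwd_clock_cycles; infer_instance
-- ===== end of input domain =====

-- B fills pre-allocated per-cycle buckets by iterating (partition, chunk) pairs instead of
-- scanning each clock cycle's anti-diagonal j-window: an alternative decomposition, same yielded sequence.

-- math.ceil(m/step) ported as the exact integer ceiling -((-m) // step); on Dom (|m|,|step| ≤ 2^31,
-- step ≠ 0) CPython's float division m/step rounds to a value with the same ceiling, so this is exact.
def pvCeilDiv (m step : Int) : Int := -(PySem.Int.floordiv (-m) step)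

-- ===== PORT A =====
-- the generator's yielded values, collected in order; yield = append to the output list
def multi_fwd_clock_cycles (m : Int) (n : Int) (step : Int) : List (List (List Int × Int)) :=
  let n_m := m
  let m' := pvCeilDiv m step
  (PySem.List.pyRange 0 (m' + n - 1) 1).foldl (fun out k =>
    out ++ [(PySem.List.pyRange (max (1 + k - m') 0) (min (1 + k) n) 1).foldl (fun rc j =>
      rc ++ [((PySem.List.pyRange 0 step 1).foldl (fun temp i =>
        if (k - j) * step + i < n_m then temp ++ [(k - j) * step + i] else temp) [], j)]) []]) []

-- ===== PORT B =====
-- buckets[c + j].append((temp, j)) = List.modify at (c + j); the comprehension = filter-then-map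
def multi_fwd_clock_cycles_alt (m : Int) (n : Int) (step : Int) : List (List (List Int × Int)) :=
  let n_m := m
  let chunks := pvCeilDiv m step
  let buckets : List (List (List Int × Int)) :=
    (PySem.List.pyRange 0 (chunks + n - 1) 1).map (fun _ => [])
  (PySem.List.pyRange 0 n 1).foldl (fun bks j =>
    (PySem.List.pyRange 0 chunks 1).foldl (fun bks c =>
      bks.modify (c + j).toNat (fun b =>
        b ++ [(((PySem.List.pyRange 0 step 1).filter (fun i => c * step + i < n_m)).map
          (fun i => c * step + i), j)])) bks) buckets

-- ===== PRECONDITION & SPEC =====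
-- with step = 0 the Python A raises ZeroDivisionError at m / step; that is all Pre_ excludes
def Pre_multi_fwd_clock_cycles (m : Int) (n : Int) (step : Int) : Prop := step ≠ 0
instance (m : Int) (n : Int) (step : Int) : Decidable (Pre_multi_fwd_clock_cycles m n step) := by unfold Pre_multi_fwd_clock_cycles; infer_instance
def pvWitness_multi_fwd_clock_cycles : Int × Int × Int := (5, 3, 2)

def Spec_multi_fwd_clock_cycles (m : Int) (n : Int) (step : Int) (out : List (List (List Int × Int))) : Prop := out = multi_fwd_clock_cycles_alt m n step
instance (m : Int) (n : Int) (step : Int) (out : List (List (List Int × Int))) : Decidable (Spec_multi_fwd_clock_cycles m n step out) := by unfold Spec_multi_fwd_clock_cycles; infer_instance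

-- ===== CLAIM (what is proved, stated in full; the proofs are below) =====
def Claim_equal_multi_fwd_clock_cycles : Prop := ∀ (m : Int) (n : Int) (step : Int), Dom_multi_fwd_clock_cycles m n step → Pre_multi_fwd_clock_cycles m n step → Spec_multi_fwd_clock_cycles m n step (multi_fwd_clock_cycles m n step)

-- ===== LEMMAS AND PROOFS =====

-- a conditional-append foldl with a Prop test is filter-then-map
theorem pv_foldl_ite_append {α β : Type} (l : List α) (q : α → Prop) [DecidablePred q]
    (f : α → β) (init : List β) :
    l.foldl (fun acc x => if q x then acc ++ [f x] else acc) init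
      = init ++ (l.filter (fun x => decide (q x))).map f := by
  simpa using PySem.List.foldl_append_if (fun x => decide (q x)) f l init

-- modifying position t of a mapped range updates the function at point t
theorem pv_modify_map {α : Type} (C : Int) (F : Int → α) (t : Int) (f : α → α)
    (h0 : 0 ≤ t) :
    ((PySem.List.pyRange 0 C 1).map F).modify t.toNat f
      = (PySem.List.pyRange 0 C 1).map (fun k => if k = t then f (F k) else F k) := by
  apply List.ext_getElem
  · simp [List.length_modify]
  · intro i h1' h2'
    simp only [List.getElem_modify, List.getElem_map, PySem.List.getElem_pyRange_one]
    have : (t.toNat = i) ↔ ((0 : Int) + i = t) := by omega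
    split_ifs with ha hb hb
    · rfl
    · exact absurd (this.mp ha) hb
    · exact absurd (this.mpr hb) ha
    · rfl

-- a pass of appends at distinct offsets c + j over a mapped range is a pointwise update
theorem pv_foldl_modify {β : Type} (P : List Int) (C j : Int) (e : Int → β) (F : Int → List β)
    (hmem : ∀ c ∈ P, 0 ≤ c + j) (hnd : P.Nodup) :
    P.foldl (fun bks c => bks.modify (c + j).toNat (fun b => b ++ [e c]))
        ((PySem.List.pyRange 0 C 1).map F)
      = (PySem.List.pyRange 0 C 1).map (fun k => if k - j ∈ P then F k ++ [e (k - j)] else F k) := by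
  induction P generalizing F with
  | nil => simp
  | cons c P ih =>
    simp only [List.foldl_cons]
    rw [pv_modify_map C F (c + j) _ (hmem c (by simp))]
    rw [ih _ (fun c' hc' => hmem c' (by simp [hc'])) hnd.of_cons]
    apply List.map_congr_left
    intro k _
    by_cases h1 : k - j ∈ P
    · have hne : k ≠ c + j := by
        intro he
        exact (List.nodup_cons.mp hnd).1 (by simpa [he] using h1)
      simp [h1, hne, List.mem_cons]
    · by_cases h2 : k = c + j
      · simp [h2, (List.nodup_cons.mp hnd).1]
      · have : ¬ (k - j = c) := by omega
        simp [h1, h2, this]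

-- B's whole double loop, characterised per final cycle index k
theorem pv_outer {β : Type} (Q : List Int) (M C : Int) (e2 : Int → Int → β) (F : Int → List β)
    (hQ : ∀ j ∈ Q, 0 ≤ j) :
    Q.foldl (fun bks j =>
        (PySem.List.pyRange 0 M 1).foldl (fun bks c =>
          bks.modify (c + j).toNat (fun b => b ++ [e2 c j])) bks)
      ((PySem.List.pyRange 0 C 1).map F)
    = (PySem.List.pyRange 0 C 1).map (fun k =>
        Q.foldl (fun acc j => if j ≤ k ∧ k < j + M then acc ++ [e2 (k - j) j] else acc) (F k)) := by
  induction Q generalizing F with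
  | nil => simp
  | cons j Q ih =>
    simp only [List.foldl_cons]
    rw [pv_foldl_modify (PySem.List.pyRange 0 M 1) C j (fun c => e2 c j) F
      (fun c hc => by have := PySem.List.mem_pyRange_one.mp hc; have := hQ j (by simp); omega)
      (PySem.List.nodup_pyRange_one 0 M)]
    rw [ih _ (fun j' hj' => hQ j' (by simp [hj']))]
    apply List.map_congr_left
    intro k _
    congr 1
    by_cases h : j ≤ k ∧ k < j + M
    · have : k - j ∈ PySem.List.pyRange 0 M 1 := PySem.List.mem_pyRange_one.mpr (by omega)
      simp [h, this]
    · have : k - j ∉ PySem.List.pyRange 0 M 1 := by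
        intro hc; exact h (by have := PySem.List.mem_pyRange_one.mp hc; omega)
      simp [h, this]

-- filtering a range by an interval clips the range
theorem pv_filter_pyRange (a b lo hi : Int) :
    (PySem.List.pyRange lo hi 1).filter (fun j => decide (a ≤ j ∧ j < b))
      = PySem.List.pyRange (max a lo) (min b hi) 1 := by
  apply List.Perm.eq_of_pairwise (le := (· < ·)) (fun x y _ _ h1 h2 => by omega)
  · exact (PySem.List.pairwise_lt_pyRange_one lo hi).filter _
  · exact PySem.List.pairwise_lt_pyRange_one _ _
  · rw [List.perm_ext_iff_of_nodup ((PySem.List.nodup_pyRange_one lo hi).filter _)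
      (PySem.List.nodup_pyRange_one _ _)]
    intro x
    simp only [List.mem_filter, PySem.List.mem_pyRange_one, decide_eq_true_eq]
    omega

theorem multi_fwd_clock_cycles_spec_aux (m n step : Int) :
    multi_fwd_clock_cycles m n step = multi_fwd_clock_cycles_alt m n step := by
  unfold multi_fwd_clock_cycles multi_fwd_clock_cycles_alt
  dsimp only
  rw [pv_outer (PySem.List.pyRange 0 n 1) (pvCeilDiv m step) (pvCeilDiv m step + n - 1)
    (fun c j => (((PySem.List.pyRange 0 step 1).filter (fun i => c * step + i < m)).map
      (fun i => c * step + i), j)) (fun _ => [])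
    (fun j hj => (PySem.List.mem_pyRange_one.mp hj).1)]
  rw [PySem.List.foldl_append_singleton_eq_map]
  rw [List.nil_append]
  apply List.map_congr_left
  intro k hk
  rw [PySem.List.foldl_append_singleton_eq_map, List.nil_append]
  rw [pv_foldl_ite_append (PySem.List.pyRange 0 n 1) (fun j => j ≤ k ∧ k < j + pvCeilDiv m step)
    (fun j => (((PySem.List.pyRange 0 step 1).filter (fun i => (k - j) * step + i < m)).map
      (fun i => (k - j) * step + i), j)) []]
  rw [List.nil_append]
  rw [List.filter_congr (q := fun j => decide (k - pvCeilDiv m step + 1 ≤ j ∧ j < k + 1))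
    (fun x _ => decide_eq_decide.mpr (by omega))]
  rw [pv_filter_pyRange]
  have h1 : 1 + k - pvCeilDiv m step = k - pvCeilDiv m step + 1 := by ring
  have h2 : (1 + k) = (k + 1) := by ring
  rw [h1, h2]
  apply List.map_congr_left
  intro j hj
  rw [pv_foldl_ite_append (PySem.List.pyRange 0 step 1) (fun i => (k - j) * step + i < m)
    (fun i => (k - j) * step + i) []]
  rw [List.nil_append]

-- ===== VERDICT (by name: the statement is the Claim_ definition above) =====
theorem multi_fwd_clock_cycles_spec : Claim_equal_multi_fwd_clock_cycles := by
  intro m n step _ _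
  exact multi_fwd_clock_cycles_spec_aux m n step
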